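-- pv_equiv track=rewrite | github.com/Kaif-T-200/CipherX | backend/scorer.py | bigram_score
-- ===== SOURCE A (Python) =====
-- COMMON_BIGRAMS = ["th", "he", "in", "er", "an", "re", "on", "at", "en", "nd", "ti", "es", "or", "te", "of",
--                   "ed", "is", "it", "al", "ar", "st", "to", "nt", "ng", "se", "ha", "as", "ou", "io", "le"]
--
-- def bigram_score(text):
--     """Score based on common English bigrams"""
--     if not text or len(text) < 2:
--         return 0
--     score = 0
--     text_lower = text.lower()
--     for bigram in COMMON_BIGRAMS:
--         score += text_lower.count(bigram) * 1
--     return min(score, 25)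
-- ===== SOURCE B (Python) =====
-- COMMON_BIGRAM_PAIRS = frozenset([
--     ("t", "h"), ("h", "e"), ("i", "n"), ("e", "r"), ("a", "n"), ("r", "e"),
--     ("o", "n"), ("a", "t"), ("e", "n"), ("n", "d"), ("t", "i"), ("e", "s"),
--     ("o", "r"), ("t", "e"), ("o", "f"), ("e", "d"), ("i", "s"), ("i", "t"),
--     ("a", "l"), ("a", "r"), ("s", "t"), ("t", "o"), ("n", "t"), ("n", "g"),
--     ("s", "e"), ("h", "a"), ("a", "s"), ("o", "u"), ("i", "o"), ("l", "e"),
-- ])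
--
-- def bigram_score(text):
--     """Score based on common English bigrams"""
--     if not text or len(text) < 2:
--         return 0
--     t = text.lower()
--     score = sum(1 for pair in zip(t, t[1:]) if pair in COMMON_BIGRAM_PAIRS)
--     return min(score, 25)
-- ===== Notes on version B (the rewrite author's own statement) =====
-- stated objective: alternative
-- what changed: A scans the text once per bigram (30 substring-count passes); B makes a single pass over the lowered text, testing each adjacent character pair for membership in a frozenset of the 30 bigrams.
import Mathlib
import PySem

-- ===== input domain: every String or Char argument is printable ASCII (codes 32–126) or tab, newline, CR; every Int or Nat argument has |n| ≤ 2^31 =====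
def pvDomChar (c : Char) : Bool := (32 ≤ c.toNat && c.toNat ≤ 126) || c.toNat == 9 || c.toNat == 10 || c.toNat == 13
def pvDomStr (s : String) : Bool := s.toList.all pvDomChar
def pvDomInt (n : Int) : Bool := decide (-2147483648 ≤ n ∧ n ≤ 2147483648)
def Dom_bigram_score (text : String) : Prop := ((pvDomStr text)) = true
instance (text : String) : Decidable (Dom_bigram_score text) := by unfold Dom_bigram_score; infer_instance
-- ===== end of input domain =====

-- B replaces A's 30 repeated substring scans by one positional pass over the
-- lowered text, testing each adjacent character pair against a frozenset
-- (objective: alternative single-pass decomposition; equal observable behaviour).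

-- ===== PORT A =====
def COMMON_BIGRAMS : List String :=
  ["th", "he", "in", "er", "an", "re", "on", "at", "en", "nd", "ti", "es", "or", "te", "of",
   "ed", "is", "it", "al", "ar", "st", "to", "nt", "ng", "se", "ha", "as", "ou", "io", "le"]

def bigram_score (text : String) : Int :=
  if text = "" ∨ PySem.Str.len text < 2 then 0
  else
    let text_lower := PySem.Str.lower text
    let score : Int :=
      COMMON_BIGRAMS.foldl (fun score bigram => score + (PySem.Str.count text_lower bigram : Int) * 1) 0
    min score 25

-- ===== PORT B =====
def COMMON_BIGRAM_PAIRS : List (Char × Char) :=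
  [('t','h'), ('h','e'), ('i','n'), ('e','r'), ('a','n'), ('r','e'),
   ('o','n'), ('a','t'), ('e','n'), ('n','d'), ('t','i'), ('e','s'),
   ('o','r'), ('t','e'), ('o','f'), ('e','d'), ('i','s'), ('i','t'),
   ('a','l'), ('a','r'), ('s','t'), ('t','o'), ('n','t'), ('n','g'),
   ('s','e'), ('h','a'), ('a','s'), ('o','u'), ('i','o'), ('l','e')]

def BIGRAM_SET : PySem.Set (Char × Char) := PySem.Set.ofList COMMON_BIGRAM_PAIRS

def bigram_score_alt (text : String) : Int :=
  if text = "" ∨ PySem.Str.len text < 2 then 0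
  else
    let t := (PySem.Str.lower text).toList
    let score : Int :=
      ((t.zip (PySem.List.slice t (some 1) none)).countP (fun pair => BIGRAM_SET.contains pair) : Int)
    min score 25

-- ===== PRECONDITION & SPEC =====
def Spec_bigram_score (text : String) (out : Int) : Prop := out = bigram_score_alt text
instance (text : String) (out : Int) : Decidable (Spec_bigram_score text out) := by unfold Spec_bigram_score; infer_instance

-- ===== CLAIM (what is proved, stated in full; the proofs are below) =====
def Claim_equal_bigram_score : Prop := ∀ (text : String), Dom_bigram_score text → Spec_bigram_score text (bigram_score text)

-- ===== LEMMAS AND PROOFS =====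

-- A's non-overlapping 2-char substring count equals the adjacent-pair window
-- count whenever the pattern's two characters differ (true of all 30 bigrams).
lemma go_two (a b : Char) (hab : a ≠ b) :
    ∀ (fuel : Nat) (l : List Char) (acc : Nat), l.length ≤ fuel →
      PySem.Chars.count.go [a, b] fuel l acc
        = acc + (l.zip l.tail).countP (fun p => decide (p = (a, b))) := by
  intro fuel
  induction fuel with
  | zero =>
    intro l acc hl
    have : l = [] := List.eq_nil_of_length_eq_zero (Nat.le_zero.mp hl)
    subst this
    simp [PySem.Chars.count.go]
  | succ n ih =>
    intro l acc hl
    match l with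
    | [] => simp [PySem.Chars.count.go]
    | [x] =>
      rw [PySem.Chars.count.go]
      have hpre : [a, b].isPrefixOf [x] = false := by simp [List.isPrefixOf]
      simp only [hpre, Bool.false_eq_true, if_false]
      rw [ih [] acc (by simp)]
      simp
    | x :: y :: t =>
      rw [PySem.Chars.count.go]
      have hlen : t.length ≤ n := by simp at hl; omega
      by_cases hxy : x = a ∧ y = b
      · obtain ⟨rfl, rfl⟩ := hxy
        have hpre : [x, y].isPrefixOf (x :: y :: t) = true := by simp [List.isPrefixOf]
        simp only [hpre, if_true, List.length_cons, List.length_nil, List.drop_succ_cons,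
          List.drop_zero]
        rw [ih t (acc + 1) hlen]
        have htail : (t.zip t.tail).countP (fun p => decide (p = (x, y)))
            = ((y :: t).zip t).countP (fun p => decide (p = (x, y))) := by
          match t with
          | [] => simp
          | z :: t' =>
            simp only [List.zip_cons_cons, List.tail_cons, List.countP_cons]
            have : decide ((y, z) = (x, y)) = false := by
              simp only [Prod.mk.injEq, decide_eq_false_iff_not, not_and]
              intro h; exact absurd h.symm hab
            simp only [this, Bool.false_eq_true, if_false]
            omega
        simp only [List.zip_cons_cons, List.tail_cons, List.countP_cons]
        simp [← htail]
        omega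
      · have hpre : [a, b].isPrefixOf (x :: y :: t) = false := by
          simp [List.isPrefixOf]
          intro h1 h2; exact absurd ⟨h1.symm, h2.symm⟩ hxy
        simp only [hpre, Bool.false_eq_true, if_false]
        rw [ih (y :: t) acc (by simpa using hl)]
        simp only [List.zip_cons_cons, List.tail_cons, List.countP_cons]
        have : decide ((x, y) = (a, b)) = false := by
          simp only [Prod.mk.injEq, decide_eq_false_iff_not, not_and]
          intro h1 h2; exact absurd ⟨h1, h2⟩ hxy
        simp only [this, Bool.false_eq_true, if_false]
        omega

lemma count_two (a b : Char) (hab : a ≠ b) (l : List Char) :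
    PySem.Chars.count l [a, b] = (l.zip l.tail).countP (fun p => decide (p = (a, b))) := by
  rw [PySem.Chars.count]
  simp only [List.isEmpty_cons, Bool.false_eq_true, if_false]
  rw [go_two a b hab l.length l 0 le_rfl]
  simp

lemma countP_mem_cons (ps : List (Char × Char)) (b : Char × Char) (bs : List (Char × Char))
    (hb : b ∉ bs) :
    ps.countP (fun p => decide (p ∈ b :: bs))
      = ps.countP (fun p => decide (p = b)) + ps.countP (fun p => decide (p ∈ bs)) := by
  induction ps with
  | nil => simp
  | cons x ps ih =>
    rw [List.countP_cons, List.countP_cons, List.countP_cons, ih]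
    by_cases hx : x = b
    · subst hx
      simp [hb]
      omega
    · by_cases hm : x ∈ bs <;> simp [hx, hm, List.mem_cons] <;> omega

lemma sum_countP (ps : List (Char × Char)) :
    ∀ (bs : List (Char × Char)), bs.Nodup →
      (bs.map (fun q => ps.countP (fun p => decide (p = q)))).sum
        = ps.countP (fun p => decide (p ∈ bs)) := by
  intro bs
  induction bs with
  | nil => simp
  | cons b bs ih =>
    intro hnd
    rw [List.nodup_cons] at hnd
    simp only [List.map_cons, List.sum_cons, ih hnd.2]
    rw [countP_mem_cons ps b bs hnd.1]

lemma score_eq (l : List Char) :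
    COMMON_BIGRAMS.foldl (fun score bg => score + (PySem.Chars.count l bg.toList : Int) * 1) 0
      = ((l.zip l.tail).countP (fun p => BIGRAM_SET.contains p) : Int) := by
  rw [PySem.List.foldl_add]
  have hmap : COMMON_BIGRAMS.map (fun bg => (PySem.Chars.count l bg.toList : Int) * 1)
      = COMMON_BIGRAM_PAIRS.map
          (fun q => ((l.zip l.tail).countP (fun p => decide (p = q)) : Int)) := by
    simp only [COMMON_BIGRAMS, COMMON_BIGRAM_PAIRS, List.map_cons, List.map_nil]
    rw [show ("th":String).toList = ['t','h'] from rfl, show ("he":String).toList = ['h','e'] from rfl, show ("in":String).toList = ['i','n'] from rfl, show ("er":String).toList = ['e','r'] from rfl, show ("an":String).toList = ['a','n'] from rfl, show ("re":String).toList = ['r','e'] from rfl, show ("on":String).toList = ['o','n'] from rfl, show ("at":String).toList = ['a','t'] from rfl, show ("en":String).toList = ['e','n'] from rfl, show ("nd":String).toList = ['n','d'] from rfl, show ("ti":String).toList = ['t','i'] from rfl, show ("es":String).toList = ['e','s'] from rfl, show ("or":String).toList = ['o','r'] from rfl, show ("te":String).toList = ['t','e'] from rfl, show ("of":String).toList =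 ['o','f'] from rfl, show ("ed":String).toList = ['e','d'] from rfl, show ("is":String).toList = ['i','s'] from rfl, show ("it":String).toList = ['i','t'] from rfl, show ("al":String).toList = ['a','l'] from rfl, show ("ar":String).toList = ['a','r'] from rfl, show ("st":String).toList = ['s','t'] from rfl, show ("to":String).toList = ['t','o'] from rfl, show ("nt":String).toList = ['n','t'] from rfl, show ("ng":String).toList = ['n','g'] from rfl, show ("se":String).toList = ['s','e'] from rfl, show ("ha":String).toList = ['h','a'] from rfl, show ("as":String).toList = ['a','s'] from rfl, show ("ou":String).toList = ['o','u'] from rfl, show ("io":String).toList = ['i','o'] from rfl, show ("le":String).toList = ['l','e'] from rfl]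
    rw [count_two 't' 'h' (by decide) l, count_two 'h' 'e' (by decide) l, count_two 'i' 'n' (by decide) l, count_two 'e' 'r' (by decide) l, count_two 'a' 'n' (by decide) l, count_two 'r' 'e' (by decide) l, count_two 'o' 'n' (by decide) l, count_two 'a' 't' (by decide) l, count_two 'e' 'n' (by decide) l, count_two 'n' 'd' (by decide) l, count_two 't' 'i' (by decide) l, count_two 'e' 's' (by decide) l, count_two 'o' 'r' (by decide) l, count_two 't' 'e' (by decide) l, count_two 'o' 'f' (by decide) l, count_two 'e' 'd' (by decide) l, count_two 'i' 's' (by decide) l, count_two 'i' 't' (by decide) l, count_two 'a' 'l' (by decide) l, count_two 'a' 'r' (by decide) l, count_two 's' 't' (by decide) l, count_two 't' 'o' (by decide) l, count_two 'n' 't' (by decide) l, count_two 'n' 'g' (by decide) l, count_two 's' 'e' (by decide) l, count_two 'h' 'a' (by decide) l, count_two 'a' 's' (by decide) l, count_two 'o' 'u' (by decide) l, count_two 'i' 'o' (by decide) l, count_two 'l' 'e' (by decide) l]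
    simp [mul_one]
  rw [hmap]
  have hset : (BIGRAM_SET : List (Char × Char)) = COMMON_BIGRAM_PAIRS := by decide
  have hpred : (l.zip l.tail).countP (fun p => BIGRAM_SET.contains p)
      = (l.zip l.tail).countP (fun p => decide (p ∈ COMMON_BIGRAM_PAIRS)) := by
    apply List.countP_congr
    intro p _
    simp [hset]
  rw [hpred, ← sum_countP (l.zip l.tail) COMMON_BIGRAM_PAIRS (by decide)]
  rw [Nat.cast_list_sum, List.map_map]
  simp [Function.comp_def]

-- ===== VERDICT (by name: the statement is the Claim_ definition above) =====
theorem bigram_score_spec : Claim_equal_bigram_score := by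
  intro text _
  unfold Spec_bigram_score bigram_score bigram_score_alt
  split_ifs with h
  · rfl
  · simp only [PySem.List.slice_from_one, PySem.Str.count]
    exact congrArg (fun s => min s 25) (score_eq (PySem.Str.lower text).toList)
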